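-- pv_equiv track=rewrite | github.com/krangelov/rgl-learner | rgl_learner/learn_paradigms.py | evalfact
-- ===== SOURCE A (Python) =====
-- def evalfact(lcs, c):
--     """Input: a list of variable-bracketed strings, the known LCS
--        Output: number of variables needed and the variables themselves in a list."""
--     allbreaks = []
--     for w in c:
--         if type(w) != str:
--             continue
--         breaks = [0] * len(lcs)
--         p = 0
--         inside = 0
--         for pos in w:
--             if pos == u'[':
--                 inside = 1
--             elif pos == u']':
--                 inside = 0
--                 breaks[p-1] = 1
--             else:
--                 if inside:
--                     p += 1
--
--         allbreaks.append(breaks)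
--     finalbreaks = [0] * len(lcs)
--     for br in allbreaks:
--         for idx, val in enumerate(br):
--             if val == 1:
--                 finalbreaks[idx] = 1
--
--     # Extract vars
--     vars = []
--     currvar = u''
--     for idx, val in enumerate(lcs):
--         currvar += lcs[idx]
--         if finalbreaks[idx] == 1:
--             vars.append(currvar)
--             currvar = u''
--
--     numvars = sum(finalbreaks)
--     return (numvars, vars)
-- ===== SOURCE B (Python) =====
-- def evalfact(lcs, c):
--     """Input: a list of variable-bracketed strings, the known LCS
--        Output: number of variables needed and the variables themselves in a list."""
--     final = [0] * len(lcs)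
--     for w in c:
--         if type(w) != str:
--             continue
--         p = 0
--         inside = False
--         for ch in w:
--             if ch == '[':
--                 inside = True
--             elif ch == ']':
--                 inside = False
--                 final[p - 1] = 1
--             elif inside:
--                 p += 1
--     breaks = [i for i, b in enumerate(final) if b]
--     pieces = []
--     start = 0
--     for pos in breaks:
--         pieces.append(''.join(lcs[start:pos + 1]))
--         start = pos + 1
--     return (len(breaks), pieces)
-- ===== Notes on version B (the rewrite author's own statement) =====
-- stated objective: faster
-- what changed: Instead of building a separate len(lcs)-sized 0/1 break vector for every string in c and OR-merging them all into finalbreaks that then drives a flag-and-accumulator character walk over lcs, B marks breaks in one shared array during a single scan, extracts the sorted break positions once, and builds the variables by slicing lcs between consecutive break positions; numvars is the number of break positions. Pre_ excludes only the inputs on which A (and B alike) raises IndexError: a word closing a bracket at a depth p for which p-1 is not a valid index into lcs.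
import Mathlib
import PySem

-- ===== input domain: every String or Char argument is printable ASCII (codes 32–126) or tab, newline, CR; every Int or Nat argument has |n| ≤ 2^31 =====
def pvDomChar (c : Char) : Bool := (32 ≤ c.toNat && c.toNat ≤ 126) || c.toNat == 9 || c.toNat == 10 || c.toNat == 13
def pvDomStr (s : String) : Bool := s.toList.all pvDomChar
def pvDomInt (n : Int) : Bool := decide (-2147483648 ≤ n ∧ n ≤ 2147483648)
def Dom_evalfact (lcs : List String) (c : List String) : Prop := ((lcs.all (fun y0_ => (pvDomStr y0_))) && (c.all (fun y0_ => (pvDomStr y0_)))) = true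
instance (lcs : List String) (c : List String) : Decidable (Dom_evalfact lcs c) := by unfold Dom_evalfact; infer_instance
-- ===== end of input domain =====

-- B replaces A's per-string indicator vectors, their OR-merge pass and the flag-driven character
-- accumulation by one shared break array filled in a single scan plus boundary-driven slicing of
-- lcs between consecutive break positions (objective: faster — no per-word len(lcs) vectors).

-- ===== PORT A =====
-- per-character step of A's inner loop: breaks[p-1] = 1 at ']', p += 1 inside brackets
def pvStepA (st : List Int × Int × Int) (ch : Char) : List Int × Int × Int :=
  if ch = '[' then (st.1, st.2.1, 1)
  else if ch = ']' then (PySem.List.pySetD st.1 (st.2.1 - 1) 1, st.2.1, 0)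
  else if st.2.2 ≠ 0 then (st.1, st.2.1 + 1, st.2.2) else st

-- 'for idx, val in enumerate(br): if val == 1: finalbreaks[idx] = 1'
def pvMergeA (fb : List Int) (br : List Int) : List Int :=
  (PySem.List.enumerate br).foldl (fun fb iv => if iv.2 = 1 then PySem.List.pySetD fb iv.1 1 else fb) fb

-- 'currvar += lcs[idx]; if finalbreaks[idx] == 1: vars.append(currvar); currvar = '''
def pvVarStepA (lcs : List String) (fb : List Int) (st : List String × List Char) (iv : Int × String) : List String × List Char :=
  let curr := st.2 ++ (PySem.List.pyGetD lcs iv.1 "").toList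
  if PySem.List.pyGetD fb iv.1 0 = 1 then (st.1 ++ [String.ofList curr], []) else (st.1, curr)

def evalfact (lcs : List String) (c : List String) : Int × List String :=
  let allbreaks : List (List Int) :=
    c.foldl (fun acc w =>
      acc ++ [(w.toList.foldl pvStepA (List.replicate lcs.length (0:Int), (0:Int), (0:Int))).1]) []
  let finalbreaks : List Int := allbreaks.foldl pvMergeA (List.replicate lcs.length (0:Int))
  let vc := (PySem.List.enumerate lcs).foldl (pvVarStepA lcs finalbreaks) ([], [])
  (finalbreaks.sum, vc.1)

-- ===== PORT B =====
-- per-character step of B's single shared scan: final[p-1] = 1 at ']', p += 1 inside brackets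
def pvStepB (st : List Int × Int × Bool) (ch : Char) : List Int × Int × Bool :=
  if ch = '[' then (st.1, st.2.1, true)
  else if ch = ']' then (PySem.List.pySetD st.1 (st.2.1 - 1) 1, st.2.1, false)
  else if st.2.2 then (st.1, st.2.1 + 1, st.2.2) else st

-- 'pieces.append(''.join(lcs[start:pos+1])); start = pos + 1'
def pvSliceB (lcs : List String) (st : List String × Int) (pos : Int) : List String × Int :=
  (st.1 ++ [PySem.Str.join "" (PySem.List.slice lcs (some st.2) (some (pos+1)))], pos+1)

def evalfact_alt (lcs : List String) (c : List String) : Int × List String :=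
  let final : List Int :=
    c.foldl (fun fin w => (w.toList.foldl pvStepB (fin, (0:Int), false)).1)
      (List.replicate lcs.length (0:Int))
  -- 'breaks = [i for i, b in enumerate(final) if b]'
  let breaks : List Int := ((PySem.List.enumerate final).filter (fun ib => ib.2 != 0)).map (fun ib => ib.1)
  let vc := breaks.foldl (pvSliceB lcs) ([], (0:Int))
  ((breaks.length : Int), vc.1)

-- ===== PRECONDITION & SPEC =====
-- pvEvents w p ins: the value of p-1 at each ']' of w, scanning with the p/inside rules both programs share
def pvEvents : List Char → Int → Bool → List Int
  | [], _, _ => []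
  | ch :: t, p, ins =>
    if ch = '[' then pvEvents t p true
    else if ch = ']' then (p - 1) :: pvEvents t p false
    else if ins then pvEvents t (p+1) ins else pvEvents t p ins

-- Pre_ excludes exactly the inputs on which A (and likewise B) raises IndexError: some word
-- closes a bracket at a depth p for which p-1 is not a valid Python index into lcs.
def Pre_evalfact (lcs : List String) (c : List String) : Prop :=
  ∀ w ∈ c, ∀ q ∈ pvEvents w.toList 0 false, -(lcs.length:Int) ≤ q ∧ q < lcs.length
instance (lcs : List String) (c : List String) : Decidable (Pre_evalfact lcs c) := by
  unfold Pre_evalfact; infer_instance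

def pvWitness_evalfact : List String × List String := (["a", "b"], ["x[y]z", "[ab][]"])

def Spec_evalfact (lcs : List String) (c : List String) (out : Int × List String) : Prop := out = evalfact_alt lcs c
instance (lcs : List String) (c : List String) (out : Int × List String) : Decidable (Spec_evalfact lcs c out) := by unfold Spec_evalfact; infer_instance

-- ===== CLAIM (what is proved, stated in full; the proofs are below) =====
def Claim_equal_evalfact : Prop := ∀ (lcs : List String) (c : List String), Dom_evalfact lcs c → Pre_evalfact lcs c → Spec_evalfact lcs c (evalfact lcs c)

-- ===== LEMMAS AND PROOFS =====

-- all break targets of the whole input, and their wrapped (normalized) versions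
def pvEall (c : List String) : List Int := c.flatMap (fun w => pvEvents w.toList 0 false)
def pvM (n : Nat) (c : List String) : List Int := (pvEall c).map (fun q => PySem.Int.mod q n)

-- the length-n indicator vector of an Int list
def pvIndic (n : Nat) (L : List Int) : List Int :=
  (List.range n).map (fun (j : Nat) => if (j:Int) ∈ L then 1 else 0)

-- ---- scans ----
theorem scanA_fst (w : List Char) : ∀ (b : List Int) (p i : Int),
    (w.foldl pvStepA (b, p, i)).1
      = (pvEvents w p (decide (i ≠ 0))).foldl (fun b q => PySem.List.pySetD b q 1) b := by
  induction w with
  | nil => intro b p i; rfl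
  | cons ch t ih =>
    intro b p i
    simp only [List.foldl_cons, pvStepA, pvEvents]
    by_cases h1 : ch = '['
    · simp [h1, ih]
    · by_cases h2 : ch = ']'
      · simp [h2, ih]
      · by_cases h3 : i ≠ 0
        · simp [h1, h2, h3, ih]
        · simp only [ne_eq, Decidable.not_not] at h3
          simp [h1, h2, h3, ih]

theorem scanB_fst (w : List Char) : ∀ (b : List Int) (p : Int) (ins : Bool),
    (w.foldl pvStepB (b, p, ins)).1
      = (pvEvents w p ins).foldl (fun b q => PySem.List.pySetD b q 1) b := by
  induction w with
  | nil => intro b p ins; rfl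
  | cons ch t ih =>
    intro b p ins
    simp only [List.foldl_cons, pvStepB, pvEvents]
    by_cases h1 : ch = '['
    · simp [h1, ih]
    · by_cases h2 : ch = ']'
      · simp [h2, ih]
      · cases ins <;> simp [h1, h2, ih]

-- ---- indicator-vector characterization of the break vectors ----
theorem pySetD_getD (bs : List Int) (q : Int) (v : Int) (n : Nat) (hlen : bs.length = n)
    (hq : -(n:Int) ≤ q ∧ q < n) (j : Nat) (hj : j < n) :
    (PySem.List.pySetD bs q v).getD j 0 = if PySem.Int.mod q n = (j:Int) then v else bs.getD j 0 := by
  have hn : 0 < n := by omega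
  have hmod : PySem.Int.mod q (n:Int) = q % (n:Int) := PySem.Int.mod_eq_emod_of_pos (b := (n:Int)) (by exact_mod_cast hn)
  have hr2 : (0 ≤ q ∧ q % (n:Int) = q) ∨ (q < 0 ∧ q % (n:Int) = q + n) := by
    rcases le_or_gt 0 q with h0 | h0
    · exact Or.inl ⟨h0, Int.emod_eq_of_lt h0 hq.2⟩
    · refine Or.inr ⟨h0, ?_⟩
      have h4 : (q + n) % (n:Int) = q % n := Int.add_emod_right q n
      rw [← h4, Int.emod_eq_of_lt (by omega) (by omega)]
  have hk : PySem.List.pySetD bs q v = bs.set (q % (n:Int)).toNat v := by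
    simp only [PySem.List.pySetD, PySem.List.pySet?, PySem.List.pyIdx?, hlen]
    rcases hr2 with ⟨h0, he⟩ | ⟨h0, he⟩
    · simp [h0, hq.2, he]
    · have h0' : ¬ (0 ≤ q) := by omega
      simp only [h0', if_false, if_pos hq.1, Option.getD_some, Option.map_some, he]
      congr 1
      omega
  rw [hk, hmod, List.getD_eq_getElem?_getD, List.getD_eq_getElem?_getD, List.getElem?_set]
  rcases hr2 with ⟨h0, he⟩ | ⟨h0, he⟩ <;>
  · by_cases hej : (q % (n:Int)) = (j:Int)
    · have h3 : (q % (n:Int)).toNat = j := by omega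
      simp [hej, hlen, hj]
    · have h3 : ¬ ((q % (n:Int)).toNat = j) := by omega
      simp [hej, h3]

theorem getD_range_eq (bs : List Int) (n : Nat) (h : bs.length = n) :
    (List.range n).map (fun j => bs.getD j 0) = bs := by
  subst h
  apply List.ext_getElem
  · simp
  · intro i h1 h2
    simp only [List.getElem_map, List.getElem_range, List.getD_eq_getElem?_getD]
    rw [List.getElem?_eq_getElem (by simpa using h2)]
    rfl

theorem setAll_eq (n : Nat) (Q : List Int) (hQ : ∀ q ∈ Q, -(n:Int) ≤ q ∧ q < n) :
    ∀ bs : List Int, bs.length = n →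
    Q.foldl (fun b q => PySem.List.pySetD b q 1) bs
      = (List.range n).map (fun (j : Nat) => if (j:Int) ∈ Q.map (fun q => PySem.Int.mod q n) then 1 else bs.getD j 0) := by
  induction Q with
  | nil =>
    intro bs hlen
    simpa using (getD_range_eq bs n hlen).symm
  | cons q t ih =>
    intro bs hlen
    have hq := hQ q (by simp)
    have hlen' : (PySem.List.pySetD bs q 1).length = n := by
      rw [PySem.List.length_pySetD, hlen]
    rw [List.foldl_cons, ih (fun x hx => hQ x (by simp [hx])) _ hlen']
    apply List.map_congr_left
    intro j hj
    simp only [List.mem_range] at hj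
    rw [pySetD_getD bs q 1 n hlen hq j hj]
    by_cases hm : (j:Int) ∈ t.map (fun q => PySem.Int.mod q n)
    · simp [hm]
    · by_cases he : PySem.Int.mod q n = (j:Int)
      · simp [hm, he]
      · have h5 : ¬ ((j:Int) = PySem.Int.mod q n) := fun h => he h.symm
        simp [hm, he, h5]

theorem breaksA_eq (n : Nat) (w : List Char) (hq : ∀ q ∈ pvEvents w 0 false, -(n:Int) ≤ q ∧ q < n) :
    (w.foldl pvStepA (List.replicate n (0:Int), (0:Int), (0:Int))).1
      = pvIndic n ((pvEvents w 0 false).map (fun q => PySem.Int.mod q n)) := by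
  rw [scanA_fst]
  have hd : (decide ((0:Int) ≠ 0)) = false := by simp
  rw [hd, setAll_eq n _ hq _ (List.length_replicate)]
  simp [pvIndic]

-- ---- the OR-merge loop (A only) ----
theorem merge_zip (br : List Int) : ∀ (fb1 fb2 : List Int), fb2.length = br.length →
    (PySem.List.enumerate br (fb1.length:Int)).foldl
        (fun fb iv => if iv.2 = 1 then PySem.List.pySetD fb iv.1 1 else fb) (fb1 ++ fb2)
      = fb1 ++ List.zipWith (fun b f => if b = (1:Int) then 1 else f) br fb2 := by
  induction br with
  | nil => intro fb1 fb2 h; simp at h; simp [h, PySem.List.enumerate]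
  | cons b t ih =>
    intro fb1 fb2 h
    cases fb2 with
    | nil => simp at h
    | cons f t2 =>
      simp only [List.length_cons] at h
      have hcons : PySem.List.enumerate (b :: t) (fb1.length:Int)
          = ((fb1.length:Int), b) :: PySem.List.enumerate t ((fb1.length:Int)+1) := rfl
      rw [hcons, List.foldl_cons]
      have hset : (if b = 1 then PySem.List.pySetD (fb1 ++ f :: t2) (fb1.length:Int) 1 else fb1 ++ f :: t2)
          = fb1 ++ (if b = 1 then (1:Int) else f) :: t2 := by
        split_ifs with hb
        · rw [PySem.List.pySetD_of_nonneg _ _ (by positivity)]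
          simp
        · rfl
      rw [hset]
      have hlen1 : ((fb1 ++ [if b = 1 then (1:Int) else f]).length : Int) = (fb1.length:Int) + 1 := by simp
      have h6 := ih (fb1 ++ [if b = 1 then (1:Int) else f]) t2 (by omega)
      rw [hlen1] at h6
      simp only [List.append_assoc, List.cons_append, List.nil_append] at h6
      rw [h6]
      simp [List.zipWith]

theorem merge_indic (n : Nat) (L0 L : List Int) :
    pvMergeA (pvIndic n L0) (pvIndic n L) = pvIndic n (L0 ++ L) := by
  have h := merge_zip (pvIndic n L) [] (pvIndic n L0) (by simp [pvIndic])
  simp only [List.nil_append, List.length_nil, Int.natCast_zero] at h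
  have h0 : PySem.List.enumerate (pvIndic n L) (0:Int) = PySem.List.enumerate (pvIndic n L) := rfl
  rw [h0] at h
  rw [pvMergeA, h]
  simp only [pvIndic, List.zipWith_map, List.zipWith_self]
  apply List.map_congr_left
  intro j hj
  by_cases h1 : (j:Int) ∈ L <;> by_cases h2 : (j:Int) ∈ L0 <;> simp [h1, h2]

theorem fold_merge (n : Nat) (Ls : List (List Int)) : ∀ (L0 : List Int),
    (Ls.map (pvIndic n)).foldl pvMergeA (pvIndic n L0) = pvIndic n (L0 ++ Ls.flatten) := by
  induction Ls with
  | nil => intro L0; simp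
  | cons L rest ih =>
    intro L0
    rw [List.map_cons, List.foldl_cons, merge_indic, ih]
    simp

-- A's finalbreaks is the indicator vector of the wrapped break positions
theorem finalbreaks_eq (lcs : List String) (c : List String) (hpre : Pre_evalfact lcs c) :
    (c.foldl (fun acc w =>
        acc ++ [(w.toList.foldl pvStepA (List.replicate lcs.length (0:Int), (0:Int), (0:Int))).1]) []).foldl
      pvMergeA (List.replicate lcs.length (0:Int))
    = pvIndic lcs.length (pvM lcs.length c) := by
  rw [PySem.List.foldl_append_singleton_eq_map, List.nil_append]
  have hmap : c.map (fun w => (w.toList.foldl pvStepA (List.replicate lcs.length (0:Int), (0:Int), (0:Int))).1)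
      = (c.map (fun w => (pvEvents w.toList 0 false).map (fun q => PySem.Int.mod q lcs.length))).map (pvIndic lcs.length) := by
    rw [List.map_map]
    apply List.map_congr_left
    intro w hw
    exact breaksA_eq lcs.length w.toList (hpre w hw)
  have hrep : List.replicate lcs.length (0:Int) = pvIndic lcs.length [] := by
    simp [pvIndic, List.map_const']
  rw [hmap, hrep]
  have h := fold_merge lcs.length (c.map (fun w => (pvEvents w.toList 0 false).map (fun q => PySem.Int.mod q lcs.length))) []
  rw [h, List.nil_append]
  congr 1
  rw [pvM, pvEall, List.flatMap_def, List.map_flatten, List.map_map]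
  rfl

-- B's shared final array is the same indicator vector
theorem finalB_eq (lcs : List String) (c : List String) (hpre : Pre_evalfact lcs c) :
    c.foldl (fun fin w => (w.toList.foldl pvStepB (fin, (0:Int), false)).1)
        (List.replicate lcs.length (0:Int))
      = pvIndic lcs.length (pvM lcs.length c) := by
  have hfuse : ∀ (cs : List String) (b0 : List Int),
      cs.foldl (fun fin w => (w.toList.foldl pvStepB (fin, (0:Int), false)).1) b0
        = (pvEall cs).foldl (fun b q => PySem.List.pySetD b q 1) b0 := by
    intro cs
    induction cs with
    | nil => intro b0; rfl
    | cons w rest ih =>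
      intro b0
      rw [List.foldl_cons, scanB_fst, pvEall, List.flatMap_cons, List.foldl_append, ih]
      rfl
  rw [hfuse]
  have hQ : ∀ q ∈ pvEall c, -(lcs.length:Int) ≤ q ∧ q < lcs.length := by
    intro q hq
    rcases List.mem_flatMap.1 hq with ⟨w, hw, hqe⟩
    exact hpre w hw q hqe
  rw [setAll_eq lcs.length (pvEall c) hQ _ (List.length_replicate)]
  simp [pvIndic, pvM]

-- B's break-position list extracted from an indicator vector
theorem breaksB_eq (n : Nat) (M : List Int) :
    ((PySem.List.enumerate (pvIndic n M)).filter (fun ib => ib.2 != 0)).map (fun ib => ib.1)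
      = ((List.range n).filter (fun j : Nat => decide ((j:Int) ∈ M))).map (fun j : Nat => (j:Int)) := by
  induction n with
  | zero => rfl
  | succ m ih =>
    have hstep : pvIndic (m+1) M = pvIndic m M ++ [if ((m:Nat):Int) ∈ M then 1 else 0] := by
      rw [pvIndic, pvIndic, List.range_succ, List.map_append]
      rfl
    have hlen : (pvIndic m M).length = m := by simp [pvIndic]
    rw [hstep, PySem.List.enumerate_append, List.filter_append, List.map_append,
      List.range_succ, List.filter_append, List.map_append, ih, hlen]
    congr 1
    by_cases hm : ((m:Nat):Int) ∈ M
    · simp [hm, PySem.List.enumerate_cons, PySem.List.enumerate_nil]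
    · simp [hm, PySem.List.enumerate_cons, PySem.List.enumerate_nil]

-- ---- variable extraction ----
theorem join_empty_chars (ls : List (List Char)) : PySem.Chars.join [] ls = ls.flatten := by
  induction ls with
  | nil => simp [PySem.Chars.join_nil]
  | cons p rest ih =>
    cases rest with
    | nil => simp [PySem.Chars.join_singleton]
    | cons q r => rw [PySem.Chars.join_cons_cons, ih]; simp

theorem strJoinEmpty (parts : List String) :
    PySem.Str.join "" parts = String.ofList ((parts.map String.toList).flatten) := by
  rw [PySem.Str.join]
  congr 1
  have h : ("":String).toList = [] := rfl
  rw [h, join_empty_chars]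

-- A's extraction loop as a recursion over the suffix of lcs
def pvSpecV (lcs : List String) (fb : List Int) : List String → Nat → List Char → List String
  | [], _, _ => []
  | _ :: t, k, curr =>
    let c := curr ++ (PySem.List.pyGetD lcs (k:Int) "").toList
    if PySem.List.pyGetD fb (k:Int) 0 = 1 then String.ofList c :: pvSpecV lcs fb t (k+1) []
    else pvSpecV lcs fb t (k+1) c

theorem foldV (lcs : List String) (fb : List Int) : ∀ (xs : List String) (k : Nat) (acc : List String) (curr : List Char),
    ((PySem.List.enumerate xs (k:Int)).foldl (pvVarStepA lcs fb) (acc, curr)).1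
      = acc ++ pvSpecV lcs fb xs k curr := by
  intro xs
  induction xs with
  | nil => intro k acc curr; simp [PySem.List.enumerate, pvSpecV]
  | cons x t ih =>
    intro k acc curr
    have hcons : PySem.List.enumerate (x :: t) (k:Int) = ((k:Int), x) :: PySem.List.enumerate t ((k:Int)+1) := rfl
    have hcast : ((k:Int)+1) = ((k+1 : Nat) : Int) := by push_cast; ring
    rw [hcons, List.foldl_cons, hcast]
    by_cases h : PySem.List.pyGetD fb (k:Int) 0 = 1
    · have hs : pvVarStepA lcs fb (acc, curr) ((k:Int), x)
          = (acc ++ [String.ofList (curr ++ (PySem.List.pyGetD lcs (k:Int) "").toList)], []) := by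
        rw [pvVarStepA]; simp [h]
      rw [hs, ih]
      simp only [pvSpecV]
      rw [if_pos h]
      simp
    · have hs : pvVarStepA lcs fb (acc, curr) ((k:Int), x)
          = (acc, curr ++ (PySem.List.pyGetD lcs (k:Int) "").toList) := by
        rw [pvVarStepA]; simp only [if_neg h]
      rw [hs, ih]
      simp only [pvSpecV]
      rw [if_neg h]

-- B's slicing loop as a recursion over the break list
def pvChunks (lcs : List String) : List Int → Int → List String
  | [], _ => []
  | q :: t, s => PySem.Str.join "" (PySem.List.slice lcs (some s) (some (q+1))) :: pvChunks lcs t (q+1)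

theorem foldC (lcs : List String) : ∀ (ps : List Int) (acc : List String) (s : Int),
    (ps.foldl (pvSliceB lcs) (acc, s)).1 = acc ++ pvChunks lcs ps s := by
  intro ps
  induction ps with
  | nil => intro acc s; simp [pvChunks]
  | cons q t ih =>
    intro acc s
    rw [List.foldl_cons, pvSliceB, pvChunks, ih]
    simp

-- the heart of the vars equivalence: flag-driven accumulation = boundary-driven slicing
theorem specV_chunks (lcs : List String) (fb : List Int) :
    ∀ (xs : List String) (k : Nat), xs = lcs.drop k →
    ∀ (start : Nat) (curr : List Char) (qs : List Int), start ≤ k →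
    curr = (((lcs.drop start).take (k - start)).map String.toList).flatten →
    qs.Pairwise (· < ·) →
    (∀ q ∈ qs, (k:Int) ≤ q ∧ q < lcs.length) →
    (∀ j : Nat, k ≤ j → j < lcs.length → (PySem.List.pyGetD fb (j:Int) 0 = 1 ↔ (j:Int) ∈ qs)) →
    pvSpecV lcs fb xs k curr = pvChunks lcs qs (start:Int) := by
  intro xs
  induction xs with
  | nil =>
    intro k hk start curr qs hsk hcurr hpw hbd hmem
    have hlen : lcs.length ≤ k := by
      have h1 := congrArg List.length hk
      simp only [List.length_nil, List.length_drop] at h1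
      omega
    have hqs : qs = [] := by
      apply List.eq_nil_iff_forall_not_mem.mpr
      intro q hq
      have := hbd q hq
      omega
    rw [hqs]
    rfl
  | cons x t ih =>
    intro k hk start curr qs hsk hcurr hpw hbd hmem
    have hklen : k < lcs.length := by
      have h1 := congrArg List.length hk
      simp only [List.length_cons, List.length_drop] at h1
      omega
    have hx : lcs[k]? = some x := by
      have h2 : (lcs.drop k)[0]? = some x := by rw [← hk]; rfl
      rwa [List.getElem?_drop, Nat.add_zero] at h2
    have ht : lcs.drop (k+1) = t := by
      have : lcs.drop (k+1) = (lcs.drop k).drop 1 := by rw [List.drop_drop]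
      rw [this, ← hk]
      rfl
    have hget : PySem.List.pyGetD lcs (k:Int) "" = x := by
      rw [PySem.List.pyGetD_natCast, List.getD_eq_getElem?_getD, hx]
      rfl
    have hc' : curr ++ x.toList = (((lcs.drop start).take (k+1-start)).map String.toList).flatten := by
      have h1 : (lcs.drop start).take (k+1-start) = (lcs.drop start).take (k-start) ++ [x] := by
        have h2 : k+1-start = (k-start)+1 := by omega
        rw [h2, List.take_add_one]
        congr 1
        rw [List.getElem?_drop]
        have h3 : start + (k - start) = k := by omega
        rw [h3, hx]
        rfl
      rw [h1, hcurr]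
      simp
    by_cases hP : PySem.List.pyGetD fb (k:Int) 0 = 1
    · have hkq : (k:Int) ∈ qs := (hmem k le_rfl hklen).1 hP
      cases qs with
      | nil => simp at hkq
      | cons q0 qs' =>
        have hq0 : q0 = (k:Int) := by
          rcases List.mem_cons.1 hkq with h | h
          · exact h.symm
          · have h4 := (List.pairwise_cons.1 hpw).1 _ h
            have h5 := (hbd q0 (List.mem_cons_self)).1
            omega
        subst hq0
        have hknq' : (k:Int) ∉ qs' := by
          intro h
          exact lt_irrefl _ ((List.pairwise_cons.1 hpw).1 _ h)
        simp only [pvSpecV, pvChunks, hget, if_pos hP]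
        congr 1
        · rw [show ((k:Int)+1) = ((k+1:Nat):Int) by push_cast; ring, PySem.List.slice_natCast, strJoinEmpty, hc']
        · rw [show ((k:Int)+1) = ((k+1:Nat):Int) by push_cast; ring]
          apply ih (k+1) ht.symm (k+1) [] qs' le_rfl (by simp)
            (List.pairwise_cons.1 hpw).2
          · intro q hq
            have h6 := (List.pairwise_cons.1 hpw).1 _ hq
            have h7 := hbd q (List.mem_cons_of_mem _ hq)
            constructor
            · push_cast; omega
            · exact h7.2
          · intro j hj hjlen
            rw [hmem j (by omega) hjlen]
            constructor
            · intro h8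
              rcases List.mem_cons.1 h8 with h9 | h9
              · exfalso
                have : j = k := by exact_mod_cast h9
                omega
              · exact h9
            · intro h8
              exact List.mem_cons_of_mem _ h8
    · have hknq : (k:Int) ∉ qs := fun hin => hP ((hmem k le_rfl hklen).2 hin)
      simp only [pvSpecV, hget, if_neg hP]
      apply ih (k+1) ht.symm start (curr ++ x.toList) qs (by omega) hc' hpw
      · intro q hq
        have h7 := hbd q hq
        have h8 : q ≠ (k:Int) := fun he => hknq (he ▸ hq)
        constructor
        · push_cast; omega
        · exact h7.2
      · intro j hj hjlen
        exact hmem j (by omega) hjlen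

theorem pyGetD_indic (n : Nat) (M : List Int) (j : Nat) (hj : j < n) :
    PySem.List.pyGetD (pvIndic n M) (j:Int) 0 = 1 ↔ (j:Int) ∈ M := by
  rw [PySem.List.pyGetD_natCast, pvIndic, PySem.List.getD_map_range _ _ _ _ hj]
  by_cases h : (j:Int) ∈ M <;> simp [h]

theorem evalfact_spec : Claim_equal_evalfact := by
  unfold Claim_equal_evalfact
  intro lcs c _ hpre
  unfold Spec_evalfact
  simp only [evalfact, evalfact_alt]
  rw [finalbreaks_eq lcs c hpre, finalB_eq lcs c hpre, breaksB_eq lcs.length (pvM lcs.length c)]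
  set M := pvM lcs.length c with hMdef
  set qs : List Int :=
    ((List.range lcs.length).filter (fun j : Nat => decide ((j:Int) ∈ M))).map (fun j : Nat => (j:Int)) with hqsdef
  have hmemqs : ∀ j : Nat, (j:Int) ∈ qs ↔ (j < lcs.length ∧ (j:Int) ∈ M) := by
    intro j
    rw [hqsdef]
    constructor
    · intro h
      rcases List.mem_map.1 h with ⟨j', hj', he⟩
      have hjj : j' = j := by exact_mod_cast he
      subst hjj
      rcases List.mem_filter.1 hj' with ⟨hr, hd⟩
      exact ⟨List.mem_range.1 hr, of_decide_eq_true hd⟩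
    · rintro ⟨h1, h2⟩
      exact List.mem_map.2 ⟨j, List.mem_filter.2 ⟨List.mem_range.2 h1, decide_eq_true h2⟩, rfl⟩
  refine Prod.ext ?_ ?_
  · -- counts: sum of the indicator = number of break positions
    simp only
    have hfun : (fun (j:Nat) => if (j:Int) ∈ M then (1:Int) else 0)
        = fun (j:Nat) => if (fun (j:Nat) => decide ((j:Int) ∈ M)) j = true then (1:Int) else 0 := by
      funext j; simp
    rw [pvIndic, hfun, PySem.List.sum_map_ite_one_zero, hqsdef, List.length_map,
      List.countP_eq_length_filter]
  · -- vars
    simp only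
    have h0 : (0:Int) = ((0:Nat):Int) := rfl
    rw [h0, foldV, foldC, List.nil_append, List.nil_append]
    apply specV_chunks
    · exact (List.drop_zero).symm
    · exact Nat.le_refl 0
    · simp
    · rw [hqsdef]
      refine List.Pairwise.map _ (fun a b h => by exact_mod_cast h) ?_
      exact List.Pairwise.sublist List.filter_sublist List.pairwise_lt_range
    · intro q hq
      rw [hqsdef] at hq
      rcases List.mem_map.1 hq with ⟨j, hj, rfl⟩
      rcases List.mem_filter.1 hj with ⟨hr, _⟩
      have := List.mem_range.1 hr
      constructor
      · positivity
      · exact_mod_cast this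
    · intro j _ hjlen
      rw [pyGetD_indic lcs.length M j hjlen, hmemqs]
      simp [hjlen]
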